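-- pv_equiv track=rewrite | github.com/blahgyn/DieCommanderLambda | Level 2/Challenge 2-1.py | solution
-- ===== SOURCE A (Python) =====
-- def solution(total_lambs):
--
--     total_Lamb_spent_low = 0
--     total_Lamb_spent_high = 0
--     currentIndex = 0
--     highLamb = []
--     lowLamb = []
--
--     while (True):
--         if (total_Lamb_spent_high < total_lambs):
--
--             if (currentIndex > 0):
--                 newHighValue = highLamb[currentIndex-1] * 2
--             else:
--                 newHighValue = 1
--
--             total_Lamb_spent_high += newHighValue
--             if (total_Lamb_spent_high <= total_lambs):
--                 highLamb.append(newHighValue)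
--
--         ## --------- LOW
--
--         if (total_Lamb_spent_low < total_lambs):
--             if (currentIndex > 1):
--                 newHighValue = lowLamb[currentIndex-2] + lowLamb[currentIndex-1]
--             else:
--                 newHighValue = 1
--
--             total_Lamb_spent_low += newHighValue
--             if (total_Lamb_spent_low <= total_lambs):
--                 lowLamb.append(newHighValue)
--
--         ## ---------- CHECK
--
--         if (total_Lamb_spent_low >= total_lambs & total_Lamb_spent_high >= total_lambs):
--             break
--
--         currentIndex = currentIndex + 1
--
--     return len(lowLamb) - len(highLamb)
-- ===== SOURCE B (Python) =====
-- def solution(total_lambs):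
--     pow_count = (total_lambs + 1).bit_length() - 1 if total_lambs >= 1 else 0
--     count = 0
--     a, b, s = 1, 1, 0
--     while s + a <= total_lambs:
--         s += a
--         count += 1
--         a, b = b, a + b
--     return count - pow_count
-- ===== Notes on version B (the rewrite author's own statement) =====
-- stated objective: simpler
-- what changed: A's single interleaved loop that grows two explicit term lists and exits via a chained bitwise-& comparison is replaced by a closed-form bit_length formula for the power-of-2 term count plus one plain three-variable Fibonacci summing loop; no lists are built.
import Mathlib
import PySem

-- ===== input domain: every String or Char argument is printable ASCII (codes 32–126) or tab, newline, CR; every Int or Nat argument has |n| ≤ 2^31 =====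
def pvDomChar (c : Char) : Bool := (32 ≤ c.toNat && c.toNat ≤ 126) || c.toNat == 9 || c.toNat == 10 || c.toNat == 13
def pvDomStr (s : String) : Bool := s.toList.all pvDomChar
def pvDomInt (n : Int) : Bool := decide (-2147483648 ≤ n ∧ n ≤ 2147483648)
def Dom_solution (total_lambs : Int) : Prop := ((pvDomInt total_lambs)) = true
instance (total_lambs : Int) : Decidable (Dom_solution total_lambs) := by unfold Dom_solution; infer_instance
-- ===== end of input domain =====

-- B replaces A's single interleaved loop (two growing term lists, exit via a chained bitwise-&
-- comparison) by a bit_length closed form for the power-of-2 count plus one plain three-variable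
-- Fibonacci summing loop (objective: simpler).

-- ===== PORT A =====
-- Python's unbounded `while True:` is ported with fuel 100; the lemmas below show the loop breaks
-- within max kH kL ≤ 45 iterations for every n in Dom, so the fuel-0 case is never reached there.
-- `highLamb[currentIndex-1]` is ported as pyGet? …|>.getD 0: the IndexError (none) case is
-- unreachable, since whenever that branch runs the list has exactly currentIndex elements.
def loopA (n : Int) : Nat → Int → Int → Nat → List Int → List Int → Int
  | 0, _, _, _, hi, lo => (lo.length : Int) - (hi.length : Int)
  | fuel+1, tlsl, tlsh, i, hi, lo =>
      let p1 : Int × List Int :=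
        if tlsh < n then
          let nh : Int := if i > 0 then ((PySem.List.pyGet? hi ((i : Int) - 1)).getD 0) * 2 else 1
          (tlsh + nh, if tlsh + nh ≤ n then hi ++ [nh] else hi)
        else (tlsh, hi)
      let p2 : Int × List Int :=
        if tlsl < n then
          let nl : Int := if i > 1 then ((PySem.List.pyGet? lo ((i : Int) - 2)).getD 0)
                                        + ((PySem.List.pyGet? lo ((i : Int) - 1)).getD 0) else 1
          (tlsl + nl, if tlsl + nl ≤ n then lo ++ [nl] else lo)
        else (tlsl, lo)
      -- Python's `tlsl >= total_lambs & tlsh >= total_lambs` is the CHAINED comparison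
      -- tlsl ≥ (n & tlsh) ∧ (n & tlsh) ≥ n  (bitwise & binds tighter than >=)
      if p2.1 ≥ PySem.Int.band n p1.1 ∧ PySem.Int.band n p1.1 ≥ n then
        (p2.2.length : Int) - (p1.2.length : Int)
      else loopA n fuel p2.1 p1.1 (i+1) p1.2 p2.2


def solution (total_lambs : Int) : Int := loopA total_lambs 100 0 0 0 [] []

-- ===== PORT B =====
-- fuel 100 likewise exceeds the ≤ 45 iterations B's loop makes for every n in Dom.
def fibLoopB (n : Int) : Nat → Int → Int → Int → Int → Int
  | 0, _, _, _, count => count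
  | fuel+1, a, b, s, count =>
      if s + a ≤ n then fibLoopB n fuel b (a + b) (s + a) (count + 1) else count

def solution_alt (total_lambs : Int) : Int :=
  (fibLoopB total_lambs 100 1 1 0 0) -
    (if total_lambs ≥ 1 then (PySem.Int.bitLength (total_lambs + 1) : Int) - 1 else 0)

-- ===== PRECONDITION & SPEC =====
def Spec_solution (total_lambs : Int) (out : Int) : Prop := out = solution_alt total_lambs
instance (total_lambs : Int) (out : Int) : Decidable (Spec_solution total_lambs out) := by unfold Spec_solution; infer_instance

-- ===== CLAIM (what is proved, stated in full; the proofs are below) =====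
def Claim_equal_solution : Prop := ∀ (total_lambs : Int), Dom_solution total_lambs → Spec_solution total_lambs (solution total_lambs)

-- ===== LEMMAS AND PROOFS =====
-- Hs k = 1+2+…+2^(k-1) = 2^k - 1 and Fs k = fib 1+…+fib k are the partial sums of the two greedy
-- sequences; kH/kL (introduced via Nat.find in pos_case) are the first indices whose partial sum
-- reaches n, and both programs return (fib term count) - (power term count) expressed from them.
def Hs (k : Nat) : Int := 2 ^ k - 1
def fibP : Nat → Int × Int
  | 0 => (1, 1)
  | k+1 => ((fibP k).2, (fibP k).1 + (fibP k).2)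
def fibZ (k : Nat) : Int := (fibP k).1
def Fs : Nat → Int
  | 0 => 0
  | k+1 => Fs k + fibZ k
lemma fibZ_add_two (k : Nat) : fibZ (k+2) = fibZ k + fibZ (k+1) := by simp [fibZ, fibP]
lemma fibP_pos (k : Nat) : 1 ≤ (fibP k).1 ∧ 1 ≤ (fibP k).2 := by
  induction k with
  | zero => simp [fibP]
  | succ k ih => simp [fibP]; omega
lemma fibZ_pos (k : Nat) : 1 ≤ fibZ k := (fibP_pos k).1
lemma Fs_strictMono : StrictMono Fs := by
  apply strictMono_nat_of_lt_succ
  intro k; have := fibZ_pos k; simp [Fs]; omega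
lemma band_mask_eq (n : Int) (k : Nat) (h1 : 0 ≤ n) (h2 : n ≤ 2 ^ k - 1) :
    PySem.Int.band n (2 ^ k - 1) = n := by
  have hk : (0:Int) ≤ 2 ^ k - 1 := by
    have : (1:Int) ≤ 2 ^ k := one_le_pow₀ (by norm_num)
    omega
  rw [PySem.Int.band_of_nonneg h1 hk]
  have ht : ((2:Int) ^ k - 1).toNat = 2 ^ k - 1 := by
    have h1' : (1:Nat) ≤ 2 ^ k := Nat.one_le_two_pow
    have hc : ((2:Int) ^ k) = ((2 ^ k : Nat) : Int) := by push_cast; ring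
    omega
  rw [ht, Nat.and_two_pow_sub_one_eq_mod]
  have hlt : n.toNat < 2 ^ k := by
    have h1' : (1:Nat) ≤ 2 ^ k := Nat.one_le_two_pow
    have hc : ((2:Int) ^ k) = ((2 ^ k : Nat) : Int) := by push_cast; ring
    omega
  rw [Nat.mod_eq_of_lt hlt]
  omega
lemma band_le_right (n m : Int) (h1 : 0 ≤ n) (h2 : 0 ≤ m) : PySem.Int.band n m ≤ m := by
  rw [PySem.Int.band_of_nonneg h1 h2]
  have := Nat.and_le_right (n := n.toNat) (m := m.toNat)
  omega
lemma get_range_map (f : Nat → Int) (i j : Nat) (h : j < i) :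
    (PySem.List.pyGet? ((List.range i).map f) ((j : Nat) : Int)).getD 0 = f j := by
  rw [PySem.List.pyGet?_natCast]
  simp [h]
lemma range_map_snoc (f : Nat → Int) (i : Nat) :
    (List.range i).map f ++ [f i] = (List.range (i+1)).map f := by
  rw [List.range_succ, List.map_append]; rfl
lemma range_map_snoc_pow (i : Nat) :
    (List.range i).map (fun j => (2:Int) ^ j) ++ [(2:Int) ^ i] = (List.range (i+1)).map (fun j => (2:Int) ^ j) :=
  range_map_snoc _ i
lemma range_map_snoc_fib (i : Nat) :
    (List.range i).map fibZ ++ [fibZ i] = (List.range (i+1)).map fibZ :=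
  range_map_snoc _ i
lemma fibZ_zero : fibZ 0 = 1 := rfl
lemma fibZ_one : fibZ 1 = 1 := rfl
lemma hs_nonneg (k : Nat) : (0:Int) ≤ Hs k := by
  have : (1:Int) ≤ 2^k := one_le_pow₀ (by norm_num)
  simp [Hs]; omega

lemma Fs_45 : Fs 45 = 2971215072 := by decide

lemma loopA_run (n : Int) (hn : 1 ≤ n) (kH kL : Nat)
    (hH1 : n ≤ Hs kH) (hH2 : ∀ j, j < kH → Hs j < n)
    (hL1 : n ≤ Fs kL) (hL2 : ∀ j, j < kL → Fs j < n) :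
    ∀ fuel i, i < max kH kL → max kH kL ≤ i + fuel →
      loopA n fuel (Fs (min i kL)) (Hs (min i kH)) i
        ((List.range (if i < kH then i else if Hs kH = n then kH else kH - 1)).map (fun j => (2:Int) ^ j))
        ((List.range (if i < kL then i else if Fs kL = n then kL else kL - 1)).map fibZ)
      = (((if Fs kL = n then kL else kL - 1 : Nat)) : Int) - (((if Hs kH = n then kH else kH - 1 : Nat)) : Int) := by
  have hkH1 : 1 ≤ kH := by
    by_contra h; have h0 : kH = 0 := by omega
    rw [h0] at hH1; simp [Hs] at hH1; omega
  have hkL1 : 1 ≤ kL := by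
    by_contra h; have h0 : kL = 0 := by omega
    rw [h0] at hL1; simp [Fs] at hL1; omega
  intro fuel
  induction fuel with
  | zero => intro i hi1 hi2; omega
  | succ fuel ih =>
    intro i hi1 hi2
    -- the state reached after this iteration's two phases
    have key : ∀ (tlsh' : Int) (hi' : List Int) (tlsl' : Int) (lo' : List Int),
        tlsh' = Hs (min (i+1) kH) →
        hi' = (List.range (if i+1 < kH then i+1 else if Hs kH = n then kH else kH - 1)).map (fun j => (2:Int) ^ j) →
        tlsl' = Fs (min (i+1) kL) →
        lo' = (List.range (if i+1 < kL then i+1 else if Fs kL = n then kL else kL - 1)).map fibZ →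
        (if tlsl' ≥ PySem.Int.band n tlsh' ∧ PySem.Int.band n tlsh' ≥ n then
          (lo'.length : Int) - (hi'.length : Int)
        else loopA n fuel tlsl' tlsh' (i+1) hi' lo')
        = (((if Fs kL = n then kL else kL - 1 : Nat)) : Int) - (((if Hs kH = n then kH else kH - 1 : Nat)) : Int) := by
      intro tlsh' hi' tlsl' lo' e1 e2 e3 e4
      by_cases hend : kH ≤ i + 1 ∧ kL ≤ i + 1
      · -- loop exits now
        have em1 : min (i+1) kH = kH := by omega
        have em2 : min (i+1) kL = kL := by omega
        have hband : PySem.Int.band n tlsh' = n := by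
          rw [e1, em1]
          have : Hs kH = 2 ^ kH - 1 := rfl
          rw [this]
          exact band_mask_eq n kH (by omega) (by have := hH1; simp [Hs] at this; omega)
        rw [if_pos (by rw [hband, e3, em2]; exact ⟨hL1, le_refl n⟩)]
        rw [e2, e4]
        have g1 : ¬ (i+1 < kH) := by omega
        have g2 : ¬ (i+1 < kL) := by omega
        simp [g1, g2]
      · -- loop continues
        have hno : ¬ (tlsl' ≥ PySem.Int.band n tlsh' ∧ PySem.Int.band n tlsh' ≥ n) := by
          by_cases hk : i + 1 < kH
          · -- high side still below n: n & tlsh' ≤ tlsh' < n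
            have em1 : min (i+1) kH = i+1 := by omega
            have hlt : tlsh' < n := by rw [e1, em1]; exact hH2 _ hk
            have hle : PySem.Int.band n tlsh' ≤ tlsh' := by
              rw [e1, em1]; exact band_le_right n _ (by omega) (hs_nonneg _)
            intro hc; omega
          · -- high frozen (n & tlsh' = n), low side still below n
            have hkl : i + 1 < kL := by omega
            have em1 : min (i+1) kH = kH := by omega
            have em2 : min (i+1) kL = i+1 := by omega
            have hband : PySem.Int.band n tlsh' = n := by
              rw [e1, em1]
              have : Hs kH = 2 ^ kH - 1 := rfl
              rw [this]
              exact band_mask_eq n kH (by omega) (by have := hH1; simp [Hs] at this; omega)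
            have hlt : tlsl' < n := by rw [e3, em2]; exact hL2 _ hkl
            intro hc; omega
        rw [if_neg hno, e1, e2, e3, e4]
        exact ih (i+1) (by omega) (by omega)
    -- now evaluate one unfolding of loopA down to the `key` shape
    simp only [loopA]
    by_cases hik : i < kH
    · have em : min i kH = i := by omega
      have hcondH : Hs (min i kH) < n := by rw [em]; exact hH2 i hik
      rw [if_pos hcondH]
      have hnh : (if i > 0 then ((PySem.List.pyGet? ((List.range (if i < kH then i else if Hs kH = n then kH else kH - 1)).map (fun j => (2:Int) ^ j)) ((i : Int) - 1)).getD 0) * 2 else 1) = 2 ^ i := by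
        by_cases hi0 : 0 < i
        · rw [if_pos hi0]
          have e : ((i:Int) - 1) = ((i-1 : Nat) : Int) := by omega
          rw [if_pos hik, e, get_range_map _ _ _ (by omega)]
          have hi1' : i - 1 + 1 = i := by omega
          rw [← pow_succ, hi1']
        · rw [if_neg hi0]
          have : i = 0 := by omega
          simp [this]
      rw [hnh, em, if_pos hik]
      have hHs : Hs i + 2 ^ i = Hs (i+1) := by
        simp [Hs, pow_succ]; ring
      rw [hHs, range_map_snoc_pow]
      have eH2 : (if Hs (i+1) ≤ n then (List.range (i+1)).map (fun j => (2:Int) ^ j) else (List.range i).map (fun j => (2:Int) ^ j))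
          = (List.range (if i+1 < kH then i+1 else if Hs kH = n then kH else kH - 1)).map (fun j => (2:Int) ^ j) := by
        by_cases hk1 : i + 1 < kH
        · rw [if_pos (le_of_lt (hH2 _ hk1)), if_pos hk1]
        · have hik1 : i + 1 = kH := by omega
          rw [if_neg hk1]
          by_cases heq : Hs kH = n
          · rw [if_pos (by rw [hik1, heq]), if_pos heq, hik1]
          · have hgt : n < Hs kH := lt_of_le_of_ne hH1 (fun h => heq h.symm)
            rw [if_neg (by rw [hik1]; omega), if_neg heq]
            have hieq : i = kH - 1 := by omega
            rw [hieq]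
      have eH1 : Hs (i+1) = Hs (min (i+1) kH) := by congr 1; omega
      rw [eH2, eH1]
      by_cases hil : i < kL
      · have emL : min i kL = i := by omega
        have hcondL : Fs (min i kL) < n := by rw [show min i kL = i by omega]; exact hL2 i hil
        rw [if_pos hcondL]
        have hnl : (if i > 1 then ((PySem.List.pyGet? ((List.range (if i < kL then i else if Fs kL = n then kL else kL - 1)).map fibZ) ((i : Int) - 2)).getD 0) + ((PySem.List.pyGet? ((List.range (if i < kL then i else if Fs kL = n then kL else kL - 1)).map fibZ) ((i : Int) - 1)).getD 0) else 1) = fibZ i := by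
          by_cases hi1' : 1 < i
          · rw [if_pos hi1']
            have e2' : ((i:Int) - 2) = ((i-2 : Nat) : Int) := by omega
            have e1' : ((i:Int) - 1) = ((i-1 : Nat) : Int) := by omega
            rw [if_pos hil, e2', e1', get_range_map _ _ _ (by omega), get_range_map _ _ _ (by omega)]
            have h2 : i - 2 + 2 = i := by omega
            have h1 : i - 2 + 1 = i - 1 := by omega
            rw [← h1, ← h2]
            exact (fibZ_add_two (i-2)).symm
          · rw [if_neg hi1']
            interval_cases i
            · exact fibZ_zero.symm
            · exact fibZ_one.symm
        rw [hnl, emL, if_pos hil]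
        have hFs : Fs i + fibZ i = Fs (i+1) := rfl
        rw [hFs, range_map_snoc_fib]
        have eL2 : (if Fs (i+1) ≤ n then (List.range (i+1)).map fibZ else (List.range i).map fibZ)
            = (List.range (if i+1 < kL then i+1 else if Fs kL = n then kL else kL - 1)).map fibZ := by
          by_cases hk1 : i + 1 < kL
          · rw [if_pos (le_of_lt (hL2 _ hk1)), if_pos hk1]
          · have hik1 : i + 1 = kL := by omega
            rw [if_neg hk1]
            by_cases heq : Fs kL = n
            · rw [if_pos (by rw [hik1, heq]), if_pos heq, hik1]
            · have hgt : n < Fs kL := lt_of_le_of_ne hL1 (fun h => heq h.symm)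
              rw [if_neg (by rw [hik1]; omega), if_neg heq]
              have hieq : i = kL - 1 := by omega
              rw [hieq]
        have eL1 : Fs (i+1) = Fs (min (i+1) kL) := by congr 1; omega
        rw [eL2, eL1]
        exact key _ _ _ _ rfl rfl rfl rfl
      · have hm : min i kL = kL := by omega
        have hcondL : ¬ (Fs (min i kL) < n) := by rw [hm]; omega
        rw [if_neg hcondL]
        have eA : Fs (min i kL) = Fs (min (i+1) kL) := by congr 1; omega
        have hnext : ¬ (i + 1 < kL) := by omega
        have eB : (if i < kL then i else if Fs kL = n then kL else kL - 1)
            = (if i+1 < kL then i+1 else if Fs kL = n then kL else kL - 1) := by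
          rw [if_neg hil, if_neg hnext]
        rw [eA, eB]
        exact key _ _ _ _ rfl rfl rfl rfl
    · have hm : min i kH = kH := by omega
      have hcondH : ¬ (Hs (min i kH) < n) := by rw [hm]; omega
      rw [if_neg hcondH]
      have eA : Hs (min i kH) = Hs (min (i+1) kH) := by congr 1; omega
      have hnext : ¬ (i + 1 < kH) := by omega
      have eB : (if i < kH then i else if Hs kH = n then kH else kH - 1)
          = (if i+1 < kH then i+1 else if Hs kH = n then kH else kH - 1) := by
        rw [if_neg hik, if_neg hnext]
      rw [eA, eB]
      by_cases hil : i < kL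
      · have emL : min i kL = i := by omega
        have hcondL : Fs (min i kL) < n := by rw [show min i kL = i by omega]; exact hL2 i hil
        rw [if_pos hcondL]
        have hnl : (if i > 1 then ((PySem.List.pyGet? ((List.range (if i < kL then i else if Fs kL = n then kL else kL - 1)).map fibZ) ((i : Int) - 2)).getD 0) + ((PySem.List.pyGet? ((List.range (if i < kL then i else if Fs kL = n then kL else kL - 1)).map fibZ) ((i : Int) - 1)).getD 0) else 1) = fibZ i := by
          by_cases hi1' : 1 < i
          · rw [if_pos hi1']
            have e2' : ((i:Int) - 2) = ((i-2 : Nat) : Int) := by omega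
            have e1' : ((i:Int) - 1) = ((i-1 : Nat) : Int) := by omega
            rw [if_pos hil, e2', e1', get_range_map _ _ _ (by omega), get_range_map _ _ _ (by omega)]
            have h2 : i - 2 + 2 = i := by omega
            have h1 : i - 2 + 1 = i - 1 := by omega
            rw [← h1, ← h2]
            exact (fibZ_add_two (i-2)).symm
          · rw [if_neg hi1']
            interval_cases i
            · exact fibZ_zero.symm
            · exact fibZ_one.symm
        rw [hnl, emL, if_pos hil]
        have hFs : Fs i + fibZ i = Fs (i+1) := rfl
        rw [hFs, range_map_snoc_fib]
        have eL2 : (if Fs (i+1) ≤ n then (List.range (i+1)).map fibZ else (List.range i).map fibZ)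
            = (List.range (if i+1 < kL then i+1 else if Fs kL = n then kL else kL - 1)).map fibZ := by
          by_cases hk1 : i + 1 < kL
          · rw [if_pos (le_of_lt (hL2 _ hk1)), if_pos hk1]
          · have hik1 : i + 1 = kL := by omega
            rw [if_neg hk1]
            by_cases heq : Fs kL = n
            · rw [if_pos (by rw [hik1, heq]), if_pos heq, hik1]
            · have hgt : n < Fs kL := lt_of_le_of_ne hL1 (fun h => heq h.symm)
              rw [if_neg (by rw [hik1]; omega), if_neg heq]
              have hieq : i = kL - 1 := by omega
              rw [hieq]
        have eL1 : Fs (i+1) = Fs (min (i+1) kL) := by congr 1; omega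
        rw [eL2, eL1]
        exact key _ _ _ _ rfl rfl rfl rfl
      · have hm : min i kL = kL := by omega
        have hcondL : ¬ (Fs (min i kL) < n) := by rw [hm]; omega
        rw [if_neg hcondL]
        have eA : Fs (min i kL) = Fs (min (i+1) kL) := by congr 1; omega
        have hnext : ¬ (i + 1 < kL) := by omega
        have eB : (if i < kL then i else if Fs kL = n then kL else kL - 1)
            = (if i+1 < kL then i+1 else if Fs kL = n then kL else kL - 1) := by
          rw [if_neg hil, if_neg hnext]
        rw [eA, eB]
        exact key _ _ _ _ rfl rfl rfl rfl


lemma fibB_run (n : Int) (hn : 1 ≤ n) (kL : Nat)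
    (hL1 : n ≤ Fs kL) (hL2 : ∀ j, j < kL → Fs j < n) :
    ∀ fuel c, c ≤ (if Fs kL = n then kL else kL - 1) →
      (if Fs kL = n then kL else kL - 1) ≤ c + fuel →
      fibLoopB n fuel (fibZ c) (fibZ (c+1)) (Fs c) (c : Int)
      = (((if Fs kL = n then kL else kL - 1 : Nat)) : Int) := by
  have hkL : 1 ≤ kL := by
    by_contra h
    have h0 : kL = 0 := by omega
    rw [h0] at hL1; simp [Fs] at hL1; omega
  intro fuel
  induction fuel with
  | zero =>
    intro c hc1 hc2
    have : c = (if Fs kL = n then kL else kL - 1) := by omega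
    simp [fibLoopB, this]
  | succ fuel ih =>
    intro c hc1 hc2
    by_cases hc : c < (if Fs kL = n then kL else kL - 1)
    · have hcond : Fs c + fibZ c ≤ n := by
        have he : Fs c + fibZ c = Fs (c+1) := rfl
        rw [he]
        by_cases heq : Fs kL = n
        · have : c + 1 ≤ kL := by simp [heq] at hc; omega
          have := Fs_strictMono.monotone this
          omega
        · have : c + 1 < kL := by simp [heq] at hc; omega
          have := hL2 _ this
          omega
      rw [fibLoopB, if_pos hcond]
      have e1 : fibZ c + fibZ (c+1) = fibZ (c+2) := (fibZ_add_two c).symm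
      have e2 : Fs c + fibZ c = Fs (c+1) := rfl
      have e3 : (c : Int) + 1 = ((c+1 : Nat) : Int) := by push_cast; ring
      rw [e1, e2, e3]
      exact ih (c+1) (by omega) (by omega)
    · have hceq : c = (if Fs kL = n then kL else kL - 1) := by omega
      have hcond : ¬ (Fs c + fibZ c ≤ n) := by
        have he : Fs c + fibZ c = Fs (c+1) := rfl
        rw [he]
        by_cases heq : Fs kL = n
        · have hck : c = kL := by simpa [heq] using hceq
          have := Fs_strictMono (show kL < kL + 1 by omega)
          rw [hck]; omega
        · have hck : c + 1 = kL := by simp [heq] at hceq; omega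
          have hlt : n < Fs kL := lt_of_le_of_ne hL1 (fun h => heq h.symm)
          rw [hck]; omega
      rw [fibLoopB, if_neg hcond, hceq]

lemma pow_count_eq (n : Int) (h1 : 1 ≤ n) (kH : Nat)
    (hH1 : n ≤ Hs kH) (hH2 : ∀ j, j < kH → Hs j < n) :
    (PySem.Int.bitLength (n+1) : Int) - 1 = (((if Hs kH = n then kH else kH - 1 : Nat)) : Int) := by
  have hkH : 1 ≤ kH := by
    by_contra h
    have h0 : kH = 0 := by omega
    rw [h0] at hH1; simp [Hs] at hH1; omega
  set L := PySem.Int.bitLength (n+1) with hL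
  set m := (n+1).toNat with hm
  have hmn : (m : Int) = n + 1 := by omega
  have hm2 : 2 ≤ m := by omega
  -- bracket for L
  have hup : m < 2 ^ L := by
    have h := PySem.Int.lt_two_pow_bitLength (n+1)
    rw [← hL] at h; omega
  have hlo : 2 ^ (L - 1) ≤ m := by
    have h := PySem.Int.two_pow_bitLength_le (n+1) (by omega)
    rw [← hL] at h; omega
  have hL1 : 1 ≤ L := by
    by_contra h
    have : L = 0 := by omega
    rw [this] at hup; simp at hup; omega
  -- bracket for cH
  set cH : Nat := if Hs kH = n then kH else kH - 1 with hcH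
  have hcast : ∀ k : Nat, ((2 ^ k : Nat) : Int) = (2:Int) ^ k := by intro k; push_cast; ring
  have hbr : 2 ^ cH ≤ m ∧ m < 2 ^ (cH + 1) := by
    by_cases heq : Hs kH = n
    · have : (2:Int) ^ kH = n + 1 := by simp [Hs] at heq; omega
      have hmk : (m : Int) = ((2 ^ kH : Nat) : Int) := by rw [hmn, hcast]; omega
      have hmk' : m = 2 ^ kH := by exact_mod_cast hmk
      constructor
      · simp [hcH, heq, hmk']
      · simp only [hcH, if_pos heq, hmk', pow_succ]
        have := Nat.one_le_two_pow (n := kH)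
        omega
    · have hcH' : cH = kH - 1 := by simp [hcH, heq]
      have hklt : n < Hs kH := lt_of_le_of_ne hH1 (fun h => heq h.symm)
      have hprev : Hs (kH - 1) < n := hH2 _ (by omega)
      have e1 : (2:Int) ^ kH = ((2 ^ kH : Nat) : Int) := (hcast kH).symm
      have e2 : (2:Int) ^ (kH-1) = ((2 ^ (kH-1) : Nat) : Int) := (hcast (kH-1)).symm
      simp [Hs] at hklt hprev
      constructor
      · rw [hcH']
        have : ((2 ^ (kH-1) : Nat) : Int) ≤ (m : Int) := by rw [hmn, ← e2]; omega
        exact_mod_cast this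
      · rw [hcH']
        have hsk : kH - 1 + 1 = kH := by omega
        rw [hsk]
        have : (m : Int) < ((2 ^ kH : Nat) : Int) := by rw [hmn, ← e1]; omega
        exact_mod_cast this
  -- uniqueness: L - 1 = cH
  have huni : L - 1 = cH := by
    have a1 : 2 ^ (L-1) < 2 ^ (cH+1) := lt_of_le_of_lt hlo hbr.2
    have a2 : 2 ^ cH < 2 ^ L := lt_of_le_of_lt hbr.1 hup
    have b1 : L - 1 < cH + 1 := by
      exact (Nat.pow_lt_pow_iff_right (by norm_num)).mp a1
    have b2 : cH < L := by
      exact (Nat.pow_lt_pow_iff_right (by norm_num)).mp a2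
    omega
  omega

lemma pos_case (n : Int) (h1 : 1 ≤ n) (h2 : n ≤ 2147483648) :
    solution n = solution_alt n := by
  have hw32 : n ≤ Hs 32 := by norm_num [Hs]; omega
  have hw45 : n ≤ Fs 45 := by rw [Fs_45]; omega
  have hexH : ∃ k, n ≤ Hs k := ⟨32, hw32⟩
  have hexL : ∃ k, n ≤ Fs k := ⟨45, hw45⟩
  set kH := Nat.find hexH with hkh
  set kL := Nat.find hexL with hkl
  have hH1 : n ≤ Hs kH := Nat.find_spec hexH
  have hH2 : ∀ j, j < kH → Hs j < n := fun j hj => not_le.mp (Nat.find_min hexH hj)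
  have hL1 : n ≤ Fs kL := Nat.find_spec hexL
  have hL2 : ∀ j, j < kL → Fs j < n := fun j hj => not_le.mp (Nat.find_min hexL hj)
  have hkH32 : kH ≤ 32 := Nat.find_min' hexH hw32
  have hkL45 : kL ≤ 45 := Nat.find_min' hexL hw45
  have hkH1 : 1 ≤ kH := by
    rcases Nat.eq_zero_or_pos kH with h | h
    · exfalso; have := hH1; rw [h] at this; simp [Hs] at this; omega
    · omega
  have hkL1 : 1 ≤ kL := by
    rcases Nat.eq_zero_or_pos kL with h | h
    · exfalso; have := hL1; rw [h] at this; simp [Fs] at this; omega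
    · omega
  have hrun := loopA_run n h1 kH kL hH1 hH2 hL1 hL2 100 0 (by omega) (by omega)
  rw [show min 0 kL = 0 by omega, show min 0 kH = 0 by omega,
      if_pos (show 0 < kH by omega), if_pos (show 0 < kL by omega)] at hrun
  have hFs0 : Fs 0 = 0 := rfl
  have hHs0 : Hs 0 = 0 := by norm_num [Hs]
  rw [hFs0, hHs0] at hrun
  simp only [List.range_zero, List.map_nil] at hrun
  have hcLle : (if Fs kL = n then kL else kL - 1) ≤ kL := by split_ifs <;> omega
  have hfib := fibB_run n h1 kL hL1 hL2 100 0 (by omega) (by omega)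
  have hf0 : fibZ 0 = 1 := rfl
  have hf1 : fibZ (0+1) = 1 := rfl
  rw [hf0, hf1, hFs0] at hfib
  have hpow := pow_count_eq n h1 kH hH1 hH2
  unfold solution solution_alt
  rw [hrun, if_pos (show n ≥ 1 by omega), hpow]
  push_cast at hfib ⊢
  omega

lemma nonpos_case (n : Int) (h : n ≤ 0) : solution n = solution_alt n := by
  have e1 : (100 : Nat) = 99 + 1 := by norm_num
  have h1 : ¬ ((0:Int) < n) := by omega
  unfold solution solution_alt
  rw [e1]
  have hA : ∀ fuel, loopA n (fuel+1) 0 0 0 [] [] = 0 := by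
    intro fuel
    simp [loopA, h1, h]
  have hB : ∀ fuel, fibLoopB n (fuel+1) 1 1 0 0 = 0 := by
    intro fuel
    simp [fibLoopB]; omega
  rw [hA 99, hB 99]
  have : ¬ (n ≥ 1) := by omega
  simp [this]

-- ===== VERDICT (by name: the statement is the Claim_ definition above) =====
theorem solution_spec : Claim_equal_solution := by
  intro n hdom
  unfold Spec_solution
  have hd : -2147483648 ≤ n ∧ n ≤ 2147483648 := by
    simpa [Dom_solution, pvDomInt] using hdom
  by_cases hp : 1 ≤ n
  · exact pos_case n hp hd.2
  · exact nonpos_case n (by omega)
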